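-- pv_equiv track=rewrite | github.com/jasoneckertsresume/exampleProjects | geneScript.3.py | orfMatchStandAlone
-- ===== SOURCE A (Python) =====
-- def orfMatchStandAlone(frameOpens, frameCloses):
--     opens = []
--     closes = []
--     checkList = []
--     for openLocus in frameOpens:
--         for closeLocus in frameCloses:
--             if (closeLocus - openLocus)%3 == 0:
--                 opens.append(openLocus)
--                 closes.append(closeLocus)
--                 checkList.append(0)
--     if sum(checkList) == 0:
--        return opens, closes
--     else:
--        return "ERROR"
-- ===== SOURCE B (Python) =====
-- def orfMatchStandAlone(frameOpens, frameCloses):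
--     # Bucket closes by residue mod 3 once (order-preserving), then
--     # emit the matching bucket for each open.
--     buckets = {0: [], 1: [], 2: []}
--     for c in frameCloses:
--         buckets[c % 3].append(c)
--     opens = []
--     closes = []
--     for o in frameOpens:
--         cs = buckets[o % 3]
--         opens.extend([o] * len(cs))
--         closes.extend(cs)
--     return opens, closes
-- ===== Notes on version B (the rewrite author's own statement) =====
-- stated objective: alternative
-- what changed: Replaces the nested scan testing every (open, close) pair (and the pointless all-zero checkList) by bucketing the closes by residue mod 3 once and appending the matching bucket per open; intended as faster, but the output is itself of pair size, so the gain is a constant factor (measured 2-5x at mid sizes, not confirmed at the largest).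
import Mathlib
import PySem

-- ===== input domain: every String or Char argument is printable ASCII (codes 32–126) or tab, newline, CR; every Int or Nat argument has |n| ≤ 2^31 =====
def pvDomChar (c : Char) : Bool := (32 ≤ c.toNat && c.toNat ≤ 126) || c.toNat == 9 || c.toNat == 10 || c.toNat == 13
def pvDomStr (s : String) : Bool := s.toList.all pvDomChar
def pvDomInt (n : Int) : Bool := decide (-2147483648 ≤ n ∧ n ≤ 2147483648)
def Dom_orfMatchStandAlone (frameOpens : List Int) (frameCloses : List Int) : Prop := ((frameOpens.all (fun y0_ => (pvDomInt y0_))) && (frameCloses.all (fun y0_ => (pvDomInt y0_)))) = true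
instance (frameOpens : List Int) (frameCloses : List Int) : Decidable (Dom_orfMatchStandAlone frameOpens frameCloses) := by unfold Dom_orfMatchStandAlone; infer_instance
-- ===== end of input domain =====

-- B replaces A's nested per-pair scan by bucketing the closes by residue mod 3 once (alternative bucketed algorithm; the output itself is pair-sized, so asymptotics are output-bound).

-- ===== PORT A =====
-- state = (opens, closes, checkList); the Python's "ERROR" branch is unreachable
-- (checkList only ever receives zeros) and is ported as ([], []).
def orfMatchStandAlone (frameOpens : List Int) (frameCloses : List Int) : List Int × List Int :=
  let st := frameOpens.foldl (fun st o =>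
    frameCloses.foldl (fun st c =>
      if PySem.Int.mod (c - o) 3 = 0 then
        (st.1 ++ [o], st.2.1 ++ [c], st.2.2 ++ [(0 : Int)])
      else st) st) ([], [], [])
  if st.2.2.sum = 0 then (st.1, st.2.1) else ([], [])

-- ===== PORT B =====
-- bucket the closes by residue mod 3 (insertion order preserved)
def orfAltBuckets (frameCloses : List Int) : List Int × List Int × List Int :=
  frameCloses.foldl (fun b c =>
    let r := PySem.Int.mod c 3
    if r = 0 then (b.1 ++ [c], b.2.1, b.2.2)
    else if r = 1 then (b.1, b.2.1 ++ [c], b.2.2)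
    else (b.1, b.2.1, b.2.2 ++ [c])) ([], [], [])

def orfMatchStandAlone_alt (frameOpens : List Int) (frameCloses : List Int) : List Int × List Int :=
  let b := orfAltBuckets frameCloses
  frameOpens.foldl (fun ac o =>
    let r := PySem.Int.mod o 3
    let cs := if r = 0 then b.1 else if r = 1 then b.2.1 else b.2.2
    (ac.1 ++ List.replicate cs.length o, ac.2 ++ cs)) ([], [])

-- ===== PRECONDITION & SPEC =====
def Spec_orfMatchStandAlone (frameOpens : List Int) (frameCloses : List Int) (out : List Int × List Int) : Prop := out = orfMatchStandAlone_alt frameOpens frameCloses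
instance (frameOpens : List Int) (frameCloses : List Int) (out : List Int × List Int) : Decidable (Spec_orfMatchStandAlone frameOpens frameCloses out) := by unfold Spec_orfMatchStandAlone; infer_instance

-- ===== CLAIM (what is proved, stated in full; the proofs are below) =====
def Claim_equal_orfMatchStandAlone : Prop := ∀ (frameOpens : List Int) (frameCloses : List Int), Dom_orfMatchStandAlone frameOpens frameCloses → Spec_orfMatchStandAlone frameOpens frameCloses (orfMatchStandAlone frameOpens frameCloses)

-- ===== LEMMAS AND PROOFS =====
-- All loop lemmas are stated over Int.emod ('%'); 'PySem.Int.mod _ 3 = _ % 3' by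
-- PySem.Int.mod_eq_emod_of_pos, applied once in the final proof.

-- the bucket fold computes the three residue filters (order-preserving)
theorem buckets_eq (fc : List Int) (x y z : List Int) :
    fc.foldl (fun b c =>
      if c % 3 = 0 then (b.1 ++ [c], b.2.1, b.2.2)
      else if c % 3 = 1 then (b.1, b.2.1 ++ [c], b.2.2)
      else (b.1, b.2.1, b.2.2 ++ [c])) (x, y, z)
    = (x ++ fc.filter (fun c => c % 3 = 0),
       y ++ fc.filter (fun c => c % 3 = 1),
       z ++ fc.filter (fun c => c % 3 = 2)) := by
  induction fc generalizing x y z with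
  | nil => simp
  | cons c cs ih =>
    simp only [List.foldl_cons, List.filter_cons]
    by_cases h0 : c % 3 = 0
    · simp [h0, -EuclideanDomain.mod_eq_zero, ih, List.append_assoc]
    · by_cases h1 : c % 3 = 1
      · simp [h1, -EuclideanDomain.mod_eq_zero, ih, List.append_assoc]
      · have h2 : c % 3 = 2 := by omega
        simp [h2, -EuclideanDomain.mod_eq_zero, ih, List.append_assoc]

-- A's inner loop over the closes, from an arbitrary state
theorem innerA_eq (o : Int) (fc : List Int) (x y z : List Int) :
    fc.foldl (fun st c =>
      if (c - o) % 3 = 0 then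
        (st.1 ++ [o], st.2.1 ++ [c], st.2.2 ++ [(0 : Int)])
      else st) (x, y, z)
    = (x ++ List.replicate (fc.filter (fun c => (c - o) % 3 = 0)).length o,
       y ++ fc.filter (fun c => (c - o) % 3 = 0),
       z ++ List.replicate (fc.filter (fun c => (c - o) % 3 = 0)).length (0 : Int)) := by
  induction fc generalizing x y z with
  | nil => simp
  | cons c cs ih =>
    simp only [List.foldl_cons, List.filter_cons]
    by_cases h : (c - o) % 3 = 0
    · simp [h, -EuclideanDomain.mod_eq_zero, ih, List.replicate_succ, List.append_assoc]
    · simp [h, -EuclideanDomain.mod_eq_zero, ih]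

-- the inner filter is exactly the residue-of-o filter
theorem filter_eq_bucket (o : Int) (fc : List Int) :
    fc.filter (fun c => (c - o) % 3 = 0)
    = fc.filter (fun c => c % 3 = o % 3) := by
  apply List.filter_congr
  intro c _
  simp only [decide_eq_decide]
  omega

-- outer loops coupled: A's (opens, closes) match B's, and checkList's sum stays z.sum
theorem outer_eq (fo fc : List Int) (x y z : List Int) (p q : List Int) (hx : x = p) (hy : y = q) :
    let sA := fo.foldl (fun st o =>
      fc.foldl (fun st c =>
        if (c - o) % 3 = 0 then
          (st.1 ++ [o], st.2.1 ++ [c], st.2.2 ++ [(0 : Int)])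
        else st) st) (x, y, z)
    let sB := fo.foldl (fun ac o =>
      let cs := if o % 3 = 0 then fc.filter (fun c => c % 3 = 0)
        else if o % 3 = 1 then fc.filter (fun c => c % 3 = 1)
        else fc.filter (fun c => c % 3 = 2)
      (ac.1 ++ List.replicate cs.length o, ac.2 ++ cs)) (p, q)
    sA.1 = sB.1 ∧ sA.2.1 = sB.2 ∧ sA.2.2.sum = z.sum := by
  induction fo generalizing x y z p q with
  | nil => simp [hx, hy]
  | cons o os ih =>
    simp only [List.foldl_cons, innerA_eq]
    have hbucket : fc.filter (fun c => (c - o) % 3 = 0)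
        = (if o % 3 = 0 then fc.filter (fun c => c % 3 = 0)
           else if o % 3 = 1 then fc.filter (fun c => c % 3 = 1)
           else fc.filter (fun c => c % 3 = 2)) := by
      rw [filter_eq_bucket]
      by_cases h0 : o % 3 = 0
      · simp [h0, -EuclideanDomain.mod_eq_zero]
      · by_cases h1 : o % 3 = 1
        · simp [h1, -EuclideanDomain.mod_eq_zero]
        · have h2 : o % 3 = 2 := by omega
          simp [h2, -EuclideanDomain.mod_eq_zero]
    rw [hbucket]
    set cs := (if o % 3 = 0 then fc.filter (fun c => c % 3 = 0)
      else if o % 3 = 1 then fc.filter (fun c => c % 3 = 1)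
      else fc.filter (fun c => c % 3 = 2)) with hcs
    have := ih (x ++ List.replicate cs.length o) (y ++ cs)
        (z ++ List.replicate cs.length (0 : Int))
        (p ++ List.replicate cs.length o) (q ++ cs)
        (by rw [hx]) (by rw [hy])
    refine ⟨this.1, this.2.1, ?_⟩
    rw [this.2.2]
    simp

-- ===== VERDICT (by name: the statement is the Claim_ definition above) =====
theorem orfMatchStandAlone_spec : Claim_equal_orfMatchStandAlone := by
  intro fo fc _
  unfold Spec_orfMatchStandAlone orfMatchStandAlone orfMatchStandAlone_alt orfAltBuckets
  simp only [PySem.Int.mod_eq_emod_of_pos (b := 3) (by norm_num)]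
  rw [buckets_eq]
  have h := outer_eq fo fc [] [] [] [] [] rfl rfl
  simp only [List.nil_append, List.sum_nil] at h ⊢
  obtain ⟨h1, h2, h3⟩ := h
  rw [if_pos h3]
  exact Prod.ext h1 h2
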